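-- pv_equiv track=rewrite | github.com/SuminBae97/AL | test.py | second_person
-- ===== SOURCE A (Python) =====
-- def second_person(n):
--     answers = [2 for _ in range(10000)]
--     for i in range(1,10000,8):
--         answers[i]=1
--
--     for i in range(3,10000,8):
--         answers[i]=3
--
--     for i in range(5,10000,8):
--         answers[i]=4
--
--     for i in range(7,10000,8):
--         answers[i]=5
--
--     return answers[:n]
-- ===== SOURCE B (Python) =====
-- def second_person(n):
--     pattern = [2, 1, 2, 3, 2, 4, 2, 5]
--     answers = [pattern[i % 8] for i in range(10000)]
--     return answers[:n]
-- ===== Notes on version B (the rewrite author's own statement) =====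
-- stated objective: simpler
-- what changed: Replaces A's fill-with-2-then-overwrite-four-strided-subsets construction by a single pass that looks each index's value up in a length-8 mod-8 pattern table.
import Mathlib
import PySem

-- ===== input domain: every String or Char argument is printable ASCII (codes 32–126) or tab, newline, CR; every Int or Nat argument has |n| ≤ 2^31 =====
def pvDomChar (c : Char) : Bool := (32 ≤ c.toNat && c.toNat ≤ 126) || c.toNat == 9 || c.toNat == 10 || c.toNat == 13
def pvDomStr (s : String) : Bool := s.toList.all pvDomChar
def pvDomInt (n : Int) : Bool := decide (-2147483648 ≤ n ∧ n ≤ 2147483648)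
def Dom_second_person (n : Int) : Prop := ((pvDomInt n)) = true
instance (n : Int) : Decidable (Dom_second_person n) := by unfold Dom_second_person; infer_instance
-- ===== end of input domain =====

-- B replaces A's fill-with-2-then-four-strided-overwrite construction by one table-lookup pass (objective: simpler).

-- ===== PORT A =====
-- answers[i] = v : pySetD is exact here — every index from range(r,10000,8) is nonnegative and < len(answers)=10000.
def second_person (n : Int) : List Int :=
  let answers := (PySem.List.pyRange 0 10000 1).map (fun _ => (2 : Int))
  let answers := (PySem.List.pyRange 1 10000 8).foldl (fun a i => PySem.List.pySetD a i 1) answers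
  let answers := (PySem.List.pyRange 3 10000 8).foldl (fun a i => PySem.List.pySetD a i 3) answers
  let answers := (PySem.List.pyRange 5 10000 8).foldl (fun a i => PySem.List.pySetD a i 4) answers
  let answers := (PySem.List.pyRange 7 10000 8).foldl (fun a i => PySem.List.pySetD a i 5) answers
  PySem.List.slice answers none (some n)

-- ===== PORT B =====
-- pattern[i % 8] : pyGetD is exact here — 0 ≤ i % 8 < 8 = len(pattern).
def second_person_alt (n : Int) : List Int :=
  let pattern : List Int := [2, 1, 2, 3, 2, 4, 2, 5]
  let answers := (PySem.List.pyRange 0 10000 1).map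
    (fun i => PySem.List.pyGetD pattern (PySem.Int.mod i 8) 0)
  PySem.List.slice answers none (some n)

-- ===== PRECONDITION & SPEC =====
def Spec_second_person (n : Int) (out : List Int) : Prop := out = second_person_alt n
instance (n : Int) (out : List Int) : Decidable (Spec_second_person n out) := by unfold Spec_second_person; infer_instance

-- ===== CLAIM (what is proved, stated in full; the proofs are below) =====
def Claim_equal_second_person : Prop := ∀ (n : Int), Dom_second_person n → Spec_second_person n (second_person n)

-- ===== LEMMAS AND PROOFS =====

lemma foldl_setD_length (v : Int) : ∀ (idxs : List Int) (xs : List Int),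
    (idxs.foldl (fun a i => PySem.List.pySetD a i v) xs).length = xs.length := by
  intro idxs
  induction idxs with
  | nil => intro xs; rfl
  | cons i rest ih =>
      intro xs
      simp only [List.foldl_cons, ih, PySem.List.length_pySetD]

lemma foldl_setD_getElem? (v : Int) : ∀ (idxs : List Int) (xs : List Int) (j : Nat),
    (∀ i ∈ idxs, 0 ≤ i) →
    (idxs.foldl (fun a i => PySem.List.pySetD a i v) xs)[j]? =
      if (j : Int) ∈ idxs ∧ j < xs.length then some v else xs[j]? := by
  intro idxs
  induction idxs with
  | nil => intro xs j _; simp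
  | cons i rest ih =>
      intro xs j hpos
      have hi : 0 ≤ i := hpos i (List.mem_cons_self ..)
      simp only [List.foldl_cons, PySem.List.pySetD_of_nonneg xs v hi]
      rw [ih _ j (fun x hx => hpos x (List.mem_cons_of_mem _ hx))]
      simp only [List.length_set, List.getElem?_set, List.mem_cons]
      by_cases hm : (j : Int) ∈ rest
      · by_cases hl : j < xs.length <;> simp [hm, hl]
        omega
      · by_cases he : i.toNat = j
        · have : (j : Int) = i := by omega
          by_cases hl : j < xs.length <;> simp_all
        · have : ¬ (j : Int) = i := by omega
          simp [hm, he, this]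

-- the full 10000-element lists of the two ports agree
lemma full_lists_eq :
    (PySem.List.pyRange 7 10000 8).foldl (fun a i => PySem.List.pySetD a i 5)
      ((PySem.List.pyRange 5 10000 8).foldl (fun a i => PySem.List.pySetD a i 4)
        ((PySem.List.pyRange 3 10000 8).foldl (fun a i => PySem.List.pySetD a i 3)
          ((PySem.List.pyRange 1 10000 8).foldl (fun a i => PySem.List.pySetD a i 1)
            ((PySem.List.pyRange 0 10000 1).map (fun _ => (2 : Int)))))) =
    (PySem.List.pyRange 0 10000 1).map
      (fun i => PySem.List.pyGetD [2, 1, 2, 3, 2, 4, 2, 5] (PySem.Int.mod i 8) 0) := by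
  apply List.ext_getElem?
  intro j
  have h8 : (0 : Int) < 8 := by norm_num
  have hp : ∀ (r : Int), 0 ≤ r → ∀ i ∈ PySem.List.pyRange r 10000 8, 0 ≤ i := by
    intro r hr i hi
    have h := (PySem.List.mem_pyRange_iff_of_pos h8 i).1 hi
    omega
  rw [foldl_setD_getElem? 5 _ _ j (hp 7 (by norm_num)),
      foldl_setD_getElem? 4 _ _ j (hp 5 (by norm_num)),
      foldl_setD_getElem? 3 _ _ j (hp 3 (by norm_num)),
      foldl_setD_getElem? 1 _ _ j (hp 1 (by norm_num))]
  simp only [foldl_setD_length, List.length_map, PySem.List.length_pyRange_one,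
    PySem.List.mem_pyRange_iff_of_pos h8]
  norm_num
  by_cases hj : j < 10000
  · rw [if_pos hj]
    have hc : ((j : Int) % 8) = ((j % 8 : Nat) : Int) := by push_cast; ring
    rw [hc, PySem.List.pyGetD_natCast]
    have hr : j % 8 = 0 ∨ j % 8 = 1 ∨ j % 8 = 2 ∨ j % 8 = 3 ∨ j % 8 = 4 ∨
        j % 8 = 5 ∨ j % 8 = 6 ∨ j % 8 = 7 := by omega
    rcases hr with h | h | h | h | h | h | h | h <;>
      rw [h] <;> split_ifs <;>
        first
          | rfl
          | (exfalso; omega)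
          | (rw [List.getElem?_replicate, if_pos (by omega)]; rfl)
  · simp only [if_neg hj, List.getElem?_replicate]
    split_ifs <;> first | rfl | omega

-- ===== VERDICT (by name: the statement is the Claim_ definition above) =====
theorem second_person_spec : Claim_equal_second_person := by
  intro n _
  unfold Spec_second_person second_person second_person_alt
  simp only [full_lists_eq]
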